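-- pv_equiv track=rewrite | github.com/P-Taeyoung/algorithm_study | 5_week/프로그래머스/container_crain_ forklift/container_crain_ forklift.py | can_carry
-- ===== SOURCE A (Python) =====
-- from collections import deque
--
-- def can_carry(storage_arr, alp):
--     find_container = alp[0]
--     to_remove = []
--
--     row_len = len(storage_arr)
--     col_len = len(storage_arr[0])
--
--     for r in range(row_len):
--         for c in range(col_len):
--             if storage_arr[r][c] == find_container:
--                 # 1. "AA"처럼 두 글자면 무조건 삭제 대상
--                 if len(alp) > 1:
--                     to_remove.append((r, c))
--                 # 2. 한 글자면 바깥과 닿아있는지 확인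
--                 else:
--                     if can_carry_by_fork(storage_arr, r, c):
--                         to_remove.append((r, c))
--
--     # 한꺼번에 지우기
--     for r, c in to_remove:
--         storage_arr[r][c] = "."
--
--     return len(to_remove)
--
-- def can_carry_by_fork(storage_arr, con_r, con_c):
--     queue = deque([(con_r, con_c)])
--     visited = [[False] * len(storage_arr[0]) for _ in range(len(storage_arr))]
--
--     row_len = len(storage_arr)
--     col_len = len(storage_arr[0])
--     visited[con_r][con_c] = True  # 시작점 방문 처리
--
--     while queue:
--         r, c = queue.popleft()
--
--         # 창고의 경계(패딩된 영역 포함)에 도달하면 외부와 연결된 것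
--         if r == 0 or r == row_len - 1 or c == 0 or c == col_len - 1:
--             return True
--
--         # 상하좌우 4방향 탐색
--         for dr, dc in [(-1, 0), (1, 0), (0, -1), (0, 1)]:
--             nr, nc = r + dr, c + dc
--
--             # 1. 범위 내에 있고
--             if 0 <= nr < row_len and 0 <= nc < col_len:
--                 # 2. 방문한 적 없으며 3. 통로(".")인 경우에만 이동
--                 if not visited[nr][nc] and storage_arr[nr][nc] == ".":
--                     visited[nr][nc] = True  # 큐에 넣을 때 즉시 방문 처리
--                     queue.append((nr, nc))
--
--     return False
-- ===== SOURCE B (Python) =====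
-- def can_carry(storage_arr, alp):
--     # Single flood fill from the boundary through '.' cells, then one adjacency
--     # check per matching container (A re-runs a BFS per container).
--     # Like A, mutates storage_arr: every counted cell is overwritten with ".".
--     find = alp[0]
--     R = len(storage_arr)
--     C = len(storage_arr[0])
--     if len(alp) > 1:
--         to_remove = [(r, c) for r in range(R) for c in range(C)
--                      if storage_arr[r][c] == find]
--     else:
--         reach = [[False] * C for _ in range(R)]
--         stack = []
--         for r in range(R):
--             for c in range(C):
--                 if (r == 0 or r == R - 1 or c == 0 or c == C - 1) and storage_arr[r][c] == ".":
--                     reach[r][c] = True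
--                     stack.append((r, c))
--         while stack:
--             r, c = stack.pop()
--             for nr, nc in ((r - 1, c), (r + 1, c), (r, c - 1), (r, c + 1)):
--                 if 0 <= nr < R and 0 <= nc < C and not reach[nr][nc] and storage_arr[nr][nc] == ".":
--                     reach[nr][nc] = True
--                     stack.append((nr, nc))
--
--         def exposed(r, c):
--             if r == 0 or r == R - 1 or c == 0 or c == C - 1:
--                 return True
--             return any(reach[nr][nc] for nr, nc in ((r - 1, c), (r + 1, c), (r, c - 1), (r, c + 1)))
--
--         to_remove = [(r, c) for r in range(R) for c in range(C)
--                      if storage_arr[r][c] == find and exposed(r, c)]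
--     for r, c in to_remove:
--         storage_arr[r][c] = "."
--     return len(to_remove)
-- ===== Notes on version B (the rewrite author's own statement) =====
-- stated objective: alternative
-- what changed: Instead of running a fresh whole-grid BFS from every matching container, B does one multi-source flood fill from the boundary '.' cells and then decides each container by a constant-time adjacency check (on the boundary, or next to a flooded cell).
import Mathlib
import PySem

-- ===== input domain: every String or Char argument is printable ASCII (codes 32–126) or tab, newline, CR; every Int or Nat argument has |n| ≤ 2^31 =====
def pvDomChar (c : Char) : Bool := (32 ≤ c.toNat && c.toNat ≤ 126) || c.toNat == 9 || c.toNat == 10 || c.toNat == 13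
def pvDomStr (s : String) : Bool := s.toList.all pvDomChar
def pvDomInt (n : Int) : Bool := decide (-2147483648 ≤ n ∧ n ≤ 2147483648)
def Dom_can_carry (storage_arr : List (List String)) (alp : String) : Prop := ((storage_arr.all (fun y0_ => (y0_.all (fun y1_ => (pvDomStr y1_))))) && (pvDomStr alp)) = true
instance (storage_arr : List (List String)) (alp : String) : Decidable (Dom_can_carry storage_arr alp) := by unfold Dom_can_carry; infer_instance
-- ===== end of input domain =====

-- B replaces A's per-container whole-grid BFS by ONE flood fill from the boundary '.'
-- cells plus a per-container adjacency check.  Python A mutates storage_arr in place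
-- (counted cells are overwritten with "."); Python B performs the same mutation; the
-- equivalence proved here is about the returned count.

-- ===== PORT A =====
-- shared low-level grid helpers (both Pythons index nested lists the same way;
-- every use is guarded so the index is in range, where getD equals Python indexing)
def gcell (g : List (List String)) (r c : Int) : String :=
  (g.getD r.toNat []).getD c.toNat ""

def vget (v : List (List Bool)) (r c : Int) : Bool :=
  (v.getD r.toNat []).getD c.toNat false

def vset (v : List (List Bool)) (r c : Int) : List (List Bool) :=
  v.set r.toNat ((v.getD r.toNat []).set c.toNat true)

-- the four (dr,dc) offsets applied to p, in A's order [(-1,0),(1,0),(0,-1),(0,1)]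
def nbrs (p : Int × Int) : List (Int × Int) :=
  [(p.1 - 1, p.2), (p.1 + 1, p.2), (p.1, p.2 - 1), (p.1, p.2 + 1)]

-- alp[0] as a 1-character Python string
def firstChar (alp : String) : String :=
  match PySem.Str.pyGet? alp 0 with
  | some ch => String.ofList [ch]
  | none => ""

-- the body of A's `for dr, dc in [...]` loop
def stepA (g : List (List String)) (st : List (List Bool) × List (Int × Int))
    (q : Int × Int) : List (List Bool) × List (Int × Int) :=
  if 0 ≤ q.1 ∧ q.1 < (g.length : Int) ∧ 0 ≤ q.2 ∧ q.2 < ((g.headD []).length : Int) then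
    if vget st.1 q.1 q.2 = false ∧ gcell g q.1 q.2 = "." then
      (vset st.1 q.1 q.2, st.2 ++ [q])
    else st
  else st

-- A's `while queue` BFS; fuel makes the loop total, 2*R*C+1 is proved sufficient below
def bfsA (g : List (List String)) : Nat → List (Int × Int) → List (List Bool) → Bool
  | 0, _, _ => false
  | _ + 1, [], _ => false
  | fuel + 1, p :: rest, visited =>
    if p.1 = 0 ∨ p.1 = (g.length : Int) - 1 ∨ p.2 = 0 ∨ p.2 = ((g.headD []).length : Int) - 1 then
      true
    else
      let st := (nbrs p).foldl (stepA g) (visited, rest)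
      bfsA g fuel st.2 st.1

def can_carry_by_fork (storage_arr : List (List String)) (con_r con_c : Int) : Bool :=
  let visited := vset (List.replicate storage_arr.length
      (List.replicate (storage_arr.headD []).length false)) con_r con_c
  bfsA storage_arr (2 * storage_arr.length * (storage_arr.headD []).length + 1)
    [(con_r, con_c)] visited

def can_carry (storage_arr : List (List String)) (alp : String) : Int :=
  let find := firstChar alp
  let to_remove := (PySem.List.pyRange 0 (storage_arr.length : Int) 1).foldl (fun acc r =>
    (PySem.List.pyRange 0 ((storage_arr.headD []).length : Int) 1).foldl (fun acc c =>
      if gcell storage_arr r c = find then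
        if 1 < PySem.Str.len alp then acc ++ [(r, c)]
        else if can_carry_by_fork storage_arr r c then acc ++ [(r, c)] else acc
      else acc) acc) ([] : List (Int × Int))
  -- Python then writes "." into each to_remove cell (mutation, not the return value)
  (to_remove.length : Int)

-- ===== PORT B =====
-- the body of B's seed loop: boundary '.' cells are marked and pushed
def seedStep (g : List (List String)) (st : List (List Bool) × List (Int × Int))
    (p : Int × Int) : List (List Bool) × List (Int × Int) :=
  if (p.1 = 0 ∨ p.1 = (g.length : Int) - 1 ∨ p.2 = 0 ∨ p.2 = ((g.headD []).length : Int) - 1) ∧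
      gcell g p.1 p.2 = "." then
    (vset st.1 p.1 p.2, st.2 ++ [p])
  else st

-- the body of B's `for nr, nc in (...)` loop
def stepB (g : List (List String)) (st : List (List Bool) × List (Int × Int))
    (q : Int × Int) : List (List Bool) × List (Int × Int) :=
  if (0 ≤ q.1 ∧ q.1 < (g.length : Int) ∧ 0 ≤ q.2 ∧ q.2 < ((g.headD []).length : Int)) ∧
      vget st.1 q.1 q.2 = false ∧ gcell g q.1 q.2 = "." then
    (vset st.1 q.1 q.2, q :: st.2)
  else st

-- B's `while stack` flood fill (stack top kept at the list head; Python appends/pops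
-- at the right end — traversal order differs, the reach matrix and result do not)
def floodB (g : List (List String)) : Nat → List (Int × Int) → List (List Bool) → List (List Bool)
  | 0, _, reach => reach
  | _ + 1, [], reach => reach
  | fuel + 1, p :: rest, reach =>
    let st := (nbrs p).foldl (stepB g) (reach, rest)
    floodB g fuel st.2 st.1

def exposedB (g : List (List String)) (reach : List (List Bool)) (r c : Int) : Bool :=
  if r = 0 ∨ r = (g.length : Int) - 1 ∨ c = 0 ∨ c = ((g.headD []).length : Int) - 1 then true
  else (nbrs (r, c)).any fun q => vget reach q.1 q.2

def can_carry_alt (storage_arr : List (List String)) (alp : String) : Int :=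
  let find := firstChar alp
  let rows := PySem.List.pyRange 0 (storage_arr.length : Int) 1
  let cols := PySem.List.pyRange 0 ((storage_arr.headD []).length : Int) 1
  let to_remove :=
    if 1 < PySem.Str.len alp then
      rows.foldl (fun acc r => cols.foldl (fun acc c =>
        if gcell storage_arr r c = find then acc ++ [(r, c)] else acc) acc) ([] : List (Int × Int))
    else
      let seed := rows.foldl (fun st r => cols.foldl (fun st c =>
          seedStep storage_arr st (r, c)) st)
        (⟨List.replicate storage_arr.length (List.replicate (storage_arr.headD []).length false),
          ([] : List (Int × Int))⟩ : List (List Bool) × List (Int × Int))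
      let reach := floodB storage_arr
        (2 * storage_arr.length * (storage_arr.headD []).length + 1) seed.2 seed.1
      rows.foldl (fun acc r => cols.foldl (fun acc c =>
        if gcell storage_arr r c = find ∧ exposedB storage_arr reach r c then acc ++ [(r, c)]
        else acc) acc) ([] : List (Int × Int))
  -- Python B performs the same mutation as A; not part of the return value
  (to_remove.length : Int)

-- ===== PRECONDITION & SPEC =====
-- Pre_ excludes exactly the inputs where Python A raises IndexError: empty alp (alp[0]),
-- empty storage_arr (storage_arr[0]), or a row shorter than row 0 (storage_arr[r][c]).
def Pre_can_carry (storage_arr : List (List String)) (alp : String) : Prop :=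
  alp ≠ "" ∧ storage_arr ≠ [] ∧
    ∀ row ∈ storage_arr, (storage_arr.headD []).length ≤ row.length

instance (storage_arr : List (List String)) (alp : String) :
    Decidable (Pre_can_carry storage_arr alp) := by unfold Pre_can_carry; infer_instance

def pvWitness_can_carry : List (List String) × String :=
  ([["A", ".", "B"], [".", "B", "A"]], "A")

def Spec_can_carry (storage_arr : List (List String)) (alp : String) (out : Int) : Prop :=
  out = can_carry_alt storage_arr alp

instance (storage_arr : List (List String)) (alp : String) (out : Int) :
    Decidable (Spec_can_carry storage_arr alp out) := by unfold Spec_can_carry; infer_instance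

-- ===== CLAIM (what is proved, stated in full; the proofs are below) =====
def Claim_equal_can_carry : Prop := ∀ (storage_arr : List (List String)) (alp : String),
  Dom_can_carry storage_arr alp → Pre_can_carry storage_arr alp →
    Spec_can_carry storage_arr alp (can_carry storage_arr alp)

-- ===== LEMMAS AND PROOFS =====

-- ---- abstract view of the grid ----
def Inb (g : List (List String)) (p : Int × Int) : Prop :=
  0 ≤ p.1 ∧ p.1 < (g.length : Int) ∧ 0 ≤ p.2 ∧ p.2 < ((g.headD []).length : Int)

def Bnd (g : List (List String)) (p : Int × Int) : Prop :=
  p.1 = 0 ∨ p.1 = (g.length : Int) - 1 ∨ p.2 = 0 ∨ p.2 = ((g.headD []).length : Int) - 1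

def Dot (g : List (List String)) (p : Int × Int) : Prop := gcell g p.1 p.2 = "."

-- one BFS step: q is a neighbour of p, inside the grid, and a '.' passage
def Stp (g : List (List String)) (p q : Int × Int) : Prop :=
  q ∈ nbrs p ∧ Inb g q ∧ Dot g q

def Reach (g : List (List String)) : Int × Int → Int × Int → Prop :=
  Relation.ReflTransGen (Stp g)

-- a flood-fill source: an in-range boundary '.' cell
def Seed (g : List (List String)) (b : Int × Int) : Prop := Inb g b ∧ Bnd g b ∧ Dot g b

def Shape (g : List (List String)) (v : List (List Bool)) : Prop :=
  v.length = g.length ∧ ∀ row ∈ v, row.length = (g.headD []).length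

def falseCount (v : List (List Bool)) : Nat := (v.map fun row => row.count false).sum

-- ---- matrix lemmas ----
lemma getD_set_self {α : Type} (l : List α) (i : Nat) (x d : α) (h : i < l.length) :
    (l.set i x).getD i d = x := by
  rw [List.getD_eq_getElem?_getD, List.getElem?_set_self h, Option.getD_some]

lemma getD_set_ne {α : Type} (l : List α) {i j : Nat} (hne : i ≠ j) (x d : α) :
    (l.set i x).getD j d = l.getD j d := by
  rw [List.getD_eq_getElem?_getD, List.getElem?_set_ne hne, ← List.getD_eq_getElem?_getD]

lemma getD_of_le {α : Type} {l : List α} {j : Nat} (h : l.length ≤ j) (d : α) :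
    l.getD j d = d := by
  rw [List.getD_eq_getElem?_getD, List.getElem?_eq_none h, Option.getD_none]

lemma getD_true_lt {l : List Bool} {j : Nat} (h : l.getD j false = true) : j < l.length := by
  by_contra hh
  rw [getD_of_le (Nat.le_of_not_lt hh)] at h
  exact absurd h (by simp)

lemma shape_vset {g v} (h : Shape g v) (r c : Int) : Shape g (vset v r c) := by
  obtain ⟨hl, hrow⟩ := h
  by_cases hi : r.toNat < v.length
  · refine ⟨by simpa [vset] using hl, ?_⟩
    intro row hmem
    rcases List.mem_or_eq_of_mem_set hmem with h1 | h1
    · exact hrow _ h1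
    · subst h1
      rw [List.length_set, List.getD_eq_getElem v [] hi]
      exact hrow _ (List.getElem_mem hi)
  · rw [vset, List.set_eq_of_length_le (Nat.le_of_not_lt hi)]
    exact ⟨hl, hrow⟩

lemma vget_vset_self {g v} (h : Shape g v) {r c : Int} (hin : Inb g (r, c)) :
    vget (vset v r c) r c = true := by
  obtain ⟨hl, hrow⟩ := h
  obtain ⟨h1, h2, h3, h4⟩ := hin
  have hi : r.toNat < v.length := by omega
  have hj : c.toNat < (v.getD r.toNat []).length := by
    rw [List.getD_eq_getElem v [] hi, hrow _ (List.getElem_mem hi)]; omega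
  unfold vget vset
  rw [getD_set_self _ _ _ _ hi, getD_set_self _ _ _ _ hj]

lemma vget_vset_ne {g v} (h : Shape g v) {a b r c : Int} (ha : Inb g (a, b)) (hr : Inb g (r, c))
    (hne : (r, c) ≠ (a, b)) : vget (vset v a b) r c = vget v r c := by
  obtain ⟨hl, hrow⟩ := h
  obtain ⟨ha1, ha2, ha3, ha4⟩ := ha
  obtain ⟨hr1, hr2, hr3, hr4⟩ := hr
  simp only at ha1 ha2 ha3 ha4 hr1 hr2 hr3 hr4
  have hia : a.toNat < v.length := by omega
  have hne' : a.toNat ≠ r.toNat ∨ b.toNat ≠ c.toNat := by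
    by_contra hcon
    push_neg at hcon
    exact hne (by rw [Prod.ext_iff]; constructor <;> simp <;> omega)
  unfold vget vset
  rcases hne' with hne' | hne'
  · rw [getD_set_ne _ hne']
  · by_cases hrc : a.toNat = r.toNat
    · rw [← hrc, getD_set_self _ _ _ _ hia, getD_set_ne _ hne']
    · rw [getD_set_ne _ hrc]

lemma vget_vset_mono {v} {a b r c : Int} (h : vget v r c = true) :
    vget (vset v a b) r c = true := by
  unfold vget at h ⊢
  unfold vset
  by_cases hia : a.toNat < v.length
  · by_cases hra : a.toNat = r.toNat
    · rw [← hra] at h ⊢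
      rw [getD_set_self _ _ _ _ hia]
      by_cases hcb : b.toNat = c.toNat
      · rw [← hcb] at h ⊢
        rw [getD_set_self _ _ _ _ (getD_true_lt h)]
      · rw [getD_set_ne _ hcb]; exact h
    · rw [getD_set_ne _ hra]; exact h
  · rw [List.set_eq_of_length_le (Nat.le_of_not_lt hia)]; exact h

lemma falseCount_vset {g v} (h : Shape g v) {a b : Int} (ha : Inb g (a, b))
    (hf : vget v a b = false) : falseCount (vset v a b) + 1 = falseCount v := by
  obtain ⟨hl, hrow⟩ := h
  obtain ⟨ha1, ha2, ha3, ha4⟩ := ha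
  simp only at ha1 ha2 ha3 ha4
  have hia : a.toNat < v.length := by omega
  have hj : b.toNat < (v.getD a.toNat []).length := by
    rw [List.getD_eq_getElem v [] hia, hrow _ (List.getElem_mem hia)]; omega
  have hcell : (v.getD a.toNat [])[b.toNat] = false := by
    unfold vget at hf
    rw [List.getD_eq_getElem?_getD, List.getElem?_eq_getElem hj] at hf
    simpa using hf
  have hmem : false ∈ v.getD a.toNat [] := by
    rw [← hcell]; exact List.getElem_mem hj
  have hpos : 0 < (v.getD a.toNat []).count false := List.count_pos_iff.mpr hmem
  have hrowcnt : ((v.getD a.toNat []).set b.toNat true).count false + 1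
      = (v.getD a.toNat []).count false := by
    rw [List.count_set hj, hcell,
      if_pos (show (false == false) = true from rfl),
      if_neg (show ¬ ((true == false) = true) from by decide)]
    omega
  unfold falseCount vset
  rw [List.map_set]
  have hmlen : a.toNat < (v.map fun row => row.count false).length := by
    rw [List.length_map]; exact hia
  rw [List.sum_set, if_pos hmlen]
  have hsplit : (v.map fun row => row.count false).sum
      = ((v.map fun row => row.count false).take a.toNat).sum
        + (v.map fun row => row.count false)[a.toNat]
        + ((v.map fun row => row.count false).drop (a.toNat + 1)).sum := by
    conv_lhs => rw [← List.take_append_drop a.toNat (v.map fun row => row.count false)]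
    rw [List.sum_append, List.drop_eq_getElem_cons hmlen, List.sum_cons]
    ring
  rw [hsplit]
  have hget : (v.map fun row => row.count false)[a.toNat] = (v.getD a.toNat []).count false := by
    rw [List.getD_eq_getElem v [] hia, List.getElem_map]
  rw [hget]
  omega

lemma falseCount_replicate (R C : Nat) :
    falseCount (List.replicate R (List.replicate C false)) = R * C := by
  unfold falseCount
  rw [List.map_replicate, List.sum_replicate, List.count_replicate]
  simp [Nat.mul_comm]

lemma vget_replicate (R C : Nat) (r c : Int) :
    vget (List.replicate R (List.replicate C false)) r c = false := by
  unfold vget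
  by_cases hr : r.toNat < R
  · rw [List.getD_replicate _ hr]
    by_cases hc : c.toNat < C
    · rw [List.getD_replicate _ hc]
    · have hcc : (List.replicate C false).length ≤ c.toNat := by
        simpa using Nat.le_of_not_lt hc
      rw [getD_of_le hcc]
  · have hrr : (List.replicate R (List.replicate C false)).length ≤ r.toNat := by
      simpa using Nat.le_of_not_lt hr
    rw [getD_of_le hrr]
    simp

lemma shape_replicate (g : List (List String)) :
    Shape g (List.replicate g.length (List.replicate (g.headD []).length false)) := by
  refine ⟨by simp, ?_⟩
  intro row hrow
  rw [List.eq_of_mem_replicate hrow]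
  simp

-- ---- graph lemmas ----
lemma mem_nbrs_symm {p q : Int × Int} (h : q ∈ nbrs p) : p ∈ nbrs q := by
  obtain ⟨p1, p2⟩ := p
  obtain ⟨q1, q2⟩ := q
  simp only [nbrs, List.mem_cons, List.mem_singleton, Prod.mk.injEq, List.not_mem_nil,
    or_false] at h ⊢
  omega

lemma reach_last {g a b} (h : Reach g a b) : b = a ∨ (Inb g b ∧ Dot g b) := by
  induction h with
  | refl => exact Or.inl rfl
  | tail _ h2 _ => exact Or.inr ⟨h2.2.1, h2.2.2⟩

lemma reach_rev {g a b} (ha1 : Inb g a) (ha2 : Dot g a) (h : Reach g a b) : Reach g b a := by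
  induction h with
  | refl => exact Relation.ReflTransGen.refl
  | @tail x y h1 h2 ih =>
    obtain ⟨hn, hinb, hdot⟩ := h2
    have hb : Inb g x ∧ Dot g x := by
      rcases reach_last h1 with he | hh
      · rw [he]; exact ⟨ha1, ha2⟩
      · exact hh
    exact Relation.ReflTransGen.head ⟨mem_nbrs_symm hn, hb.1, hb.2⟩ ih

-- a container cell s can reach the boundary iff it is on the boundary or has a
-- neighbouring '.' cell reachable from some boundary '.' cell
lemma reach_bnd_iff {g} {s : Int × Int} (hs : Inb g s) :
    (∃ p, Reach g s p ∧ Bnd g p) ↔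
      (Bnd g s ∨ ∃ n, Stp g s n ∧ ∃ b, Seed g b ∧ Reach g b n) := by
  constructor
  · rintro ⟨p, hr, hb⟩
    rcases Relation.ReflTransGen.cases_head hr with he | ⟨n, hsn, hnp⟩
    · exact Or.inl (he ▸ hb)
    · right
      have hnd : Inb g n ∧ Dot g n := ⟨hsn.2.1, hsn.2.2⟩
      have hp : Inb g p ∧ Dot g p := by
        rcases reach_last hnp with he | hh
        · rw [he]; exact hnd
        · exact hh
      exact ⟨n, hsn, p, ⟨hp.1, hb, hp.2⟩, reach_rev hnd.1 hnd.2 hnp⟩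
  · rintro (hb | ⟨n, hsn, b, hseed, hr⟩)
    · exact ⟨s, Relation.ReflTransGen.refl, hb⟩
    · exact ⟨b, Relation.ReflTransGen.head hsn (reach_rev hseed.1 hseed.2.2 hr), hseed.2.1⟩

-- ---- A's BFS computes reachability to the boundary ----
lemma foldA_spec (g : List (List String)) (ds : List (Int × Int)) :
    ∀ (v : List (List Bool)) (q : List (Int × Int)), Shape g v →
    ∃ news : List (Int × Int),
      (ds.foldl (stepA g) (v, q)).2 = q ++ news ∧
      Shape g (ds.foldl (stepA g) (v, q)).1 ∧
      (∀ r c, vget v r c = true → vget (ds.foldl (stepA g) (v, q)).1 r c = true) ∧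
      (∀ p : Int × Int, Inb g p → vget (ds.foldl (stepA g) (v, q)).1 p.1 p.2 = true →
        vget v p.1 p.2 = true ∨ p ∈ news) ∧
      (∀ p ∈ news, p ∈ ds ∧ Inb g p ∧ Dot g p ∧
        vget (ds.foldl (stepA g) (v, q)).1 p.1 p.2 = true) ∧
      (∀ p ∈ ds, Inb g p → Dot g p → vget (ds.foldl (stepA g) (v, q)).1 p.1 p.2 = true) ∧
      2 * falseCount (ds.foldl (stepA g) (v, q)).1 + ((ds.foldl (stepA g) (v, q)).2).length ≤
        2 * falseCount v + q.length := by
  induction ds with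
  | nil =>
    intro v q hs
    exact ⟨[], by simp, hs, fun _ _ h => h, fun p _ h => Or.inl h, by simp, by simp, by simp⟩
  | cons d ds ih =>
    intro v q hs
    rw [List.foldl_cons]
    by_cases hin : 0 ≤ d.1 ∧ d.1 < (g.length : Int) ∧ 0 ≤ d.2 ∧ d.2 < ((g.headD []).length : Int)
    · by_cases hvd : vget v d.1 d.2 = false ∧ gcell g d.1 d.2 = "."
      · have hstep : stepA g (v, q) d = (vset v d.1 d.2, q ++ [d]) := by
          unfold stepA; rw [if_pos hin, if_pos hvd]
        rw [hstep]
        have hinb : Inb g d := hin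
        have hs' : Shape g (vset v d.1 d.2) := shape_vset hs d.1 d.2
        obtain ⟨news, hq, hsh, hmono, horig, hnews, hproc, hmeas⟩ := ih (vset v d.1 d.2) (q ++ [d]) hs'
        refine ⟨d :: news, ?_, hsh, ?_, ?_, ?_, ?_, ?_⟩
        · rw [hq, List.append_assoc]; rfl
        · intro r c h; exact hmono r c (vget_vset_mono h)
        · intro p hp hfin
          rcases horig p hp hfin with h | h
          · by_cases hpd : p = d
            · exact Or.inr (by simp [hpd])
            · left
              rwa [vget_vset_ne hs hinb hp (by simpa using hpd)] at h
          · exact Or.inr (List.mem_cons_of_mem _ h)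
        · intro p hp
          rcases List.mem_cons.mp hp with rfl | hp'
          · exact ⟨List.mem_cons_self, hinb, hvd.2, hmono _ _ (vget_vset_self hs hinb)⟩
          · obtain ⟨h1, h2, h3, h4⟩ := hnews p hp'
            exact ⟨List.mem_cons_of_mem _ h1, h2, h3, h4⟩
        · intro p hp hinp hdotp
          rcases List.mem_cons.mp hp with rfl | hp'
          · exact hmono _ _ (vget_vset_self hs hinp)
          · exact hproc p hp' hinp hdotp
        · have hfc := falseCount_vset hs hinb hvd.1
          have hlen : (q ++ [d]).length = q.length + 1 := by simp
          omega
      · have hstep : stepA g (v, q) d = (v, q) := by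
          unfold stepA; rw [if_pos hin, if_neg hvd]
        rw [hstep]
        obtain ⟨news, hq, hsh, hmono, horig, hnews, hproc, hmeas⟩ := ih v q hs
        refine ⟨news, hq, hsh, hmono, horig, ?_, ?_, hmeas⟩
        · intro p hp
          obtain ⟨h1, h2, h3, h4⟩ := hnews p hp
          exact ⟨List.mem_cons_of_mem _ h1, h2, h3, h4⟩
        · intro p hp hinp hdotp
          rcases List.mem_cons.mp hp with rfl | hp'
          · have hv : vget v p.1 p.2 = true := by
              rcases Bool.eq_false_or_eq_true (vget v p.1 p.2) with h | h
              · exact h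
              · exact absurd ⟨h, hdotp⟩ hvd
            exact hmono _ _ hv
          · exact hproc p hp' hinp hdotp
    · have hstep : stepA g (v, q) d = (v, q) := by
        unfold stepA; rw [if_neg hin]
      rw [hstep]
      obtain ⟨news, hq, hsh, hmono, horig, hnews, hproc, hmeas⟩ := ih v q hs
      refine ⟨news, hq, hsh, hmono, horig, ?_, ?_, hmeas⟩
      · intro p hp
        obtain ⟨h1, h2, h3, h4⟩ := hnews p hp
        exact ⟨List.mem_cons_of_mem _ h1, h2, h3, h4⟩
      · intro p hp hinp hdotp
        rcases List.mem_cons.mp hp with rfl | hp'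
        · exact absurd hinp hin
        · exact hproc p hp' hinp hdotp

lemma reach_visited {g : List (List String)} {v : List (List Bool)}
    (hcl : ∀ p : Int × Int, Inb g p → vget v p.1 p.2 = true →
      ∀ r, Stp g p r → vget v r.1 r.2 = true)
    {b x : Int × Int} (hb1 : Inb g b) (hb2 : vget v b.1 b.2 = true) (h : Reach g b x) :
    Inb g x ∧ vget v x.1 x.2 = true := by
  induction h with
  | refl => exact ⟨hb1, hb2⟩
  | tail h1 h2 ih => exact ⟨h2.2.1, hcl _ ih.1 ih.2 _ h2⟩

lemma no_escape {g : List (List String)} {s : Int × Int} {v : List (List Bool)}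
    (hs : Inb g s) (hstart : vget v s.1 s.2 = true)
    (hcl : ∀ p : Int × Int, Inb g p → vget v p.1 p.2 = true →
      ¬ Bnd g p ∧ ∀ r, Stp g p r → vget v r.1 r.2 = true) :
    ¬ ∃ p, Reach g s p ∧ Bnd g p := by
  rintro ⟨p, hr, hb⟩
  have h := reach_visited (fun p hi hv => (hcl p hi hv).2) hs hstart hr
  exact (hcl p h.1 h.2).1 hb

lemma bfsA_correct (g : List (List String)) (s : Int × Int) (hs : Inb g s) :
    ∀ (fuel : Nat) (q : List (Int × Int)) (v : List (List Bool)),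
      Shape g v →
      (∀ p ∈ q, Inb g p ∧ vget v p.1 p.2 = true) →
      (∀ p : Int × Int, Inb g p → vget v p.1 p.2 = true → Reach g s p) →
      (∀ p : Int × Int, Inb g p → vget v p.1 p.2 = true →
        p ∈ q ∨ (¬ Bnd g p ∧ ∀ r, Stp g p r → vget v r.1 r.2 = true)) →
      vget v s.1 s.2 = true →
      2 * falseCount v + q.length ≤ fuel →
      (bfsA g fuel q v = true ↔ ∃ p, Reach g s p ∧ Bnd g p) := by
  intro fuel
  induction fuel with
  | zero =>
    intro q v hvs hq hreach hcl hstart hmeas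
    have hq0 : q = [] := List.length_eq_zero_iff.mp (by omega)
    subst hq0
    rw [show bfsA g 0 [] v = false from rfl]
    simp only [Bool.false_eq_true, false_iff]
    exact no_escape hs hstart
      (fun p hi hv => (hcl p hi hv).resolve_left List.not_mem_nil)
  | succ fuel ih =>
    intro q v hvs hq hreach hcl hstart hmeas
    cases q with
    | nil =>
      rw [show bfsA g (fuel + 1) [] v = false from rfl]
      simp only [Bool.false_eq_true, false_iff]
      exact no_escape hs hstart
        (fun p hi hv => (hcl p hi hv).resolve_left List.not_mem_nil)
    | cons p rest =>
      by_cases hb : p.1 = 0 ∨ p.1 = (g.length : Int) - 1 ∨ p.2 = 0 ∨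
          p.2 = ((g.headD []).length : Int) - 1
      · have hT : bfsA g (fuel + 1) (p :: rest) v = true := by
          simp only [bfsA]; rw [if_pos hb]
        rw [hT]
        have hpq := hq p List.mem_cons_self
        exact iff_of_true rfl ⟨p, hreach p hpq.1 hpq.2, hb⟩
      · have hunf : bfsA g (fuel + 1) (p :: rest) v
            = bfsA g fuel ((nbrs p).foldl (stepA g) (v, rest)).2
                ((nbrs p).foldl (stepA g) (v, rest)).1 := by
          simp only [bfsA]; rw [if_neg hb]
        rw [hunf]
        obtain ⟨news, hq2, hsh, hmono, horig, hnews, hproc, hmeas2⟩ :=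
          foldA_spec g (nbrs p) v rest hvs
        have hpq := hq p List.mem_cons_self
        refine ih _ _ hsh ?_ ?_ ?_ ?_ ?_
        · intro x hx
          rw [hq2] at hx
          rcases List.mem_append.mp hx with hx | hx
          · exact ⟨(hq x (List.mem_cons_of_mem _ hx)).1,
              hmono _ _ (hq x (List.mem_cons_of_mem _ hx)).2⟩
          · obtain ⟨_, h2, _, h4⟩ := hnews x hx
            exact ⟨h2, h4⟩
        · intro x hxi hxv
          rcases horig x hxi hxv with h | h
          · exact hreach x hxi h
          · obtain ⟨h1, h2, h3, _⟩ := hnews x h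
            exact Relation.ReflTransGen.tail (hreach p hpq.1 hpq.2) ⟨h1, h2, h3⟩
        · intro x hxi hxv
          rcases horig x hxi hxv with h | h
          · rcases hcl x hxi h with hx | ⟨hnb, hcls⟩
            · rcases List.mem_cons.mp hx with rfl | hx'
              · exact Or.inr ⟨hb, fun r hst => hproc r hst.1 hst.2.1 hst.2.2⟩
              · exact Or.inl (by rw [hq2]; exact List.mem_append_left _ hx')
            · exact Or.inr ⟨hnb, fun r hst => hmono _ _ (hcls r hst)⟩
          · exact Or.inl (by rw [hq2]; exact List.mem_append_right _ h)
        · exact hmono _ _ hstart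
        · have hlen : (p :: rest).length = rest.length + 1 := rfl
          omega

lemma fork_correct {g : List (List String)} {s : Int × Int} (hs : Inb g s) :
    can_carry_by_fork g s.1 s.2 = true ↔ ∃ p, Reach g s p ∧ Bnd g p := by
  have hshb := shape_replicate g
  have key : ∀ p : Int × Int, Inb g p →
      vget (vset (List.replicate g.length (List.replicate (g.headD []).length false))
        s.1 s.2) p.1 p.2 = true → p = s := by
    intro p hpi hpv
    by_cases hps : p = s
    · exact hps
    · rw [vget_vset_ne hshb hs hpi (by simpa [Prod.ext_iff] using hps)] at hpv
      rw [vget_replicate] at hpv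
      exact absurd hpv (by simp)
  unfold can_carry_by_fork
  refine bfsA_correct g s hs _ _ _ (shape_vset hshb _ _) ?_ ?_ ?_ ?_ ?_
  · intro p hp
    rw [List.mem_singleton] at hp
    subst hp
    exact ⟨hs, vget_vset_self hshb hs⟩
  · intro p hpi hpv
    rw [key p hpi hpv]
    exact Relation.ReflTransGen.refl
  · intro p hpi hpv
    exact Or.inl (List.mem_singleton.mpr (by rw [key p hpi hpv]))
  · exact vget_vset_self hshb hs
  · have h1 := falseCount_vset hshb hs (vget_replicate g.length (g.headD []).length s.1 s.2)
    have h2 := falseCount_replicate g.length (g.headD []).length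
    rw [Nat.mul_assoc]
    simp only [List.length_singleton]
    omega

-- ---- B's flood fill computes reachability from the boundary ----
def prodL (g : List (List String)) : List (Int × Int) :=
  (PySem.List.pyRange 0 (g.length : Int) 1).flatMap fun r =>
    (PySem.List.pyRange 0 ((g.headD []).length : Int) 1).map fun c => (r, c)

lemma mem_prodL {g p} : p ∈ prodL g ↔ Inb g p := by
  constructor
  · intro h
    simp only [prodL, List.mem_flatMap, List.mem_map] at h
    obtain ⟨r, hr, c, hc, rfl⟩ := h
    rw [PySem.List.mem_pyRange_one] at hr hc
    exact ⟨hr.1, hr.2, hc.1, hc.2⟩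
  · intro h
    simp only [prodL, List.mem_flatMap, List.mem_map]
    exact ⟨p.1, PySem.List.mem_pyRange_one.mpr ⟨h.1, h.2.1⟩, p.2,
      PySem.List.mem_pyRange_one.mpr ⟨h.2.2.1, h.2.2.2⟩, rfl⟩

lemma nodup_prodL (g : List (List String)) : (prodL g).Nodup := by
  refine List.nodup_flatMap.mpr ⟨?_, ?_⟩
  · intro r _
    exact (PySem.List.nodup_pyRange_one _ _).map
      (fun c c' h => by simpa using congrArg Prod.snd h)
  · refine (PySem.List.pairwise_lt_pyRange_one _ _).imp ?_
    intro r r' hlt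
    intro x hx hx'
    simp only [List.mem_map] at hx hx'
    obtain ⟨c, _, rfl⟩ := hx
    obtain ⟨c', _, he⟩ := hx'
    have := congrArg Prod.fst he
    simp at this
    omega

lemma nested_foldl_eq (g : List (List String)) {β : Type} (f : β → Int × Int → β) (init : β) :
    (PySem.List.pyRange 0 (g.length : Int) 1).foldl (fun st r =>
      (PySem.List.pyRange 0 ((g.headD []).length : Int) 1).foldl (fun st c => f st (r, c)) st) init
      = (prodL g).foldl f init := by
  unfold prodL
  rw [List.foldl_flatMap]
  refine PySem.List.foldl_congr_mem _ _ _ _ ?_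
  intro acc x _
  rw [List.foldl_map]

lemma foldSeed_spec (g : List (List String)) (ds : List (Int × Int)) :
    ∀ (v : List (List Bool)) (q : List (Int × Int)), Shape g v → ds.Nodup →
    (∀ p ∈ ds, Inb g p ∧ vget v p.1 p.2 = false) →
    ∃ news : List (Int × Int),
      (ds.foldl (seedStep g) (v, q)).2 = q ++ news ∧
      Shape g (ds.foldl (seedStep g) (v, q)).1 ∧
      (∀ r c, vget v r c = true → vget (ds.foldl (seedStep g) (v, q)).1 r c = true) ∧
      (∀ p : Int × Int, Inb g p → vget (ds.foldl (seedStep g) (v, q)).1 p.1 p.2 = true →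
        vget v p.1 p.2 = true ∨ p ∈ news) ∧
      (∀ p ∈ news, p ∈ ds ∧ Seed g p ∧ vget (ds.foldl (seedStep g) (v, q)).1 p.1 p.2 = true) ∧
      (∀ p ∈ ds, Seed g p → vget (ds.foldl (seedStep g) (v, q)).1 p.1 p.2 = true) ∧
      falseCount (ds.foldl (seedStep g) (v, q)).1 + ((ds.foldl (seedStep g) (v, q)).2).length =
        falseCount v + q.length := by
  induction ds with
  | nil =>
    intro v q hs _ _
    exact ⟨[], by simp, hs, fun _ _ h => h, fun p _ h => Or.inl h, by simp, by simp, by simp⟩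
  | cons d ds ih =>
    intro v q hs hnd hall
    have hdinb : Inb g d := (hall d List.mem_cons_self).1
    have hdf : vget v d.1 d.2 = false := (hall d List.mem_cons_self).2
    have hnd' : ds.Nodup := (List.nodup_cons.mp hnd).2
    have hdnot : d ∉ ds := (List.nodup_cons.mp hnd).1
    rw [List.foldl_cons]
    by_cases hc : (d.1 = 0 ∨ d.1 = (g.length : Int) - 1 ∨ d.2 = 0 ∨
        d.2 = ((g.headD []).length : Int) - 1) ∧ gcell g d.1 d.2 = "."
    · have hstep : seedStep g (v, q) d = (vset v d.1 d.2, q ++ [d]) := by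
        unfold seedStep; rw [if_pos hc]
      rw [hstep]
      have hs' : Shape g (vset v d.1 d.2) := shape_vset hs d.1 d.2
      have hall' : ∀ p ∈ ds, Inb g p ∧ vget (vset v d.1 d.2) p.1 p.2 = false := by
        intro p hp
        have h1 := hall p (List.mem_cons_of_mem _ hp)
        refine ⟨h1.1, ?_⟩
        rw [vget_vset_ne hs hdinb h1.1 ?_]
        · exact h1.2
        · simp only [ne_eq, Prod.ext_iff, not_and]
          intro he1 he2
          exact hdnot (by rw [show p = d from Prod.ext he1 he2] at hp; exact hp)
      obtain ⟨news, hq, hsh, hmono, horig, hnews, hproc, hmeas⟩ := ih (vset v d.1 d.2) (q ++ [d]) hs' hnd' hall'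
      refine ⟨d :: news, ?_, hsh, ?_, ?_, ?_, ?_, ?_⟩
      · rw [hq, List.append_assoc]; rfl
      · intro r c h; exact hmono r c (vget_vset_mono h)
      · intro p hp hfin
        rcases horig p hp hfin with h | h
        · by_cases hpd : p = d
          · exact Or.inr (by simp [hpd])
          · left
            rwa [vget_vset_ne hs hdinb hp (by simpa using hpd)] at h
        · exact Or.inr (List.mem_cons_of_mem _ h)
      · intro p hp
        rcases List.mem_cons.mp hp with rfl | hp'
        · exact ⟨List.mem_cons_self, ⟨hdinb, hc.1, hc.2⟩,
            hmono _ _ (vget_vset_self hs hdinb)⟩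
        · obtain ⟨h1, h2, h3⟩ := hnews p hp'
          exact ⟨List.mem_cons_of_mem _ h1, h2, h3⟩
      · intro p hp hseed
        rcases List.mem_cons.mp hp with rfl | hp'
        · exact hmono _ _ (vget_vset_self hs hdinb)
        · exact hproc p hp' hseed
      · have hfc := falseCount_vset hs hdinb hdf
        have hlen : (q ++ [d]).length = q.length + 1 := by simp
        omega
    · have hstep : seedStep g (v, q) d = (v, q) := by
        unfold seedStep; rw [if_neg hc]
      rw [hstep]
      obtain ⟨news, hq, hsh, hmono, horig, hnews, hproc, hmeas⟩ := ih v q hs hnd'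
        (fun p hp => hall p (List.mem_cons_of_mem _ hp))
      refine ⟨news, hq, hsh, hmono, horig, ?_, ?_, hmeas⟩
      · intro p hp
        obtain ⟨h1, h2, h3⟩ := hnews p hp
        exact ⟨List.mem_cons_of_mem _ h1, h2, h3⟩
      · intro p hp hseed
        rcases List.mem_cons.mp hp with rfl | hp'
        · exact absurd ⟨hseed.2.1, hseed.2.2⟩ hc
        · exact hproc p hp' hseed

lemma foldB_spec (g : List (List String)) (ds : List (Int × Int)) :
    ∀ (v : List (List Bool)) (q : List (Int × Int)), Shape g v →
    ∃ news : List (Int × Int),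
      (ds.foldl (stepB g) (v, q)).2 = news ++ q ∧
      Shape g (ds.foldl (stepB g) (v, q)).1 ∧
      (∀ r c, vget v r c = true → vget (ds.foldl (stepB g) (v, q)).1 r c = true) ∧
      (∀ p : Int × Int, Inb g p → vget (ds.foldl (stepB g) (v, q)).1 p.1 p.2 = true →
        vget v p.1 p.2 = true ∨ p ∈ news) ∧
      (∀ p ∈ news, p ∈ ds ∧ Inb g p ∧ Dot g p ∧
        vget (ds.foldl (stepB g) (v, q)).1 p.1 p.2 = true) ∧
      (∀ p ∈ ds, Inb g p → Dot g p → vget (ds.foldl (stepB g) (v, q)).1 p.1 p.2 = true) ∧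
      2 * falseCount (ds.foldl (stepB g) (v, q)).1 + ((ds.foldl (stepB g) (v, q)).2).length ≤
        2 * falseCount v + q.length := by
  induction ds with
  | nil =>
    intro v q hs
    exact ⟨[], by simp, hs, fun _ _ h => h, fun p _ h => Or.inl h, by simp, by simp, by simp⟩
  | cons d ds ih =>
    intro v q hs
    rw [List.foldl_cons]
    by_cases hc : (0 ≤ d.1 ∧ d.1 < (g.length : Int) ∧ 0 ≤ d.2 ∧
        d.2 < ((g.headD []).length : Int)) ∧ vget v d.1 d.2 = false ∧ gcell g d.1 d.2 = "."
    · have hstep : stepB g (v, q) d = (vset v d.1 d.2, d :: q) := by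
        unfold stepB; rw [if_pos hc]
      rw [hstep]
      have hdinb : Inb g d := hc.1
      have hs' : Shape g (vset v d.1 d.2) := shape_vset hs d.1 d.2
      obtain ⟨news, hq, hsh, hmono, horig, hnews, hproc, hmeas⟩ := ih (vset v d.1 d.2) (d :: q) hs'
      refine ⟨news ++ [d], ?_, hsh, ?_, ?_, ?_, ?_, ?_⟩
      · rw [hq, List.append_assoc]; rfl
      · intro r c h; exact hmono r c (vget_vset_mono h)
      · intro p hp hfin
        rcases horig p hp hfin with h | h
        · by_cases hpd : p = d
          · exact Or.inr (by simp [hpd])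
          · left
            rwa [vget_vset_ne hs hdinb hp (by simpa using hpd)] at h
        · exact Or.inr (List.mem_append_left _ h)
      · intro p hp
        rcases List.mem_append.mp hp with hp' | hp'
        · obtain ⟨h1, h2, h3, h4⟩ := hnews p hp'
          exact ⟨List.mem_cons_of_mem _ h1, h2, h3, h4⟩
        · rw [List.mem_singleton] at hp'
          subst hp'
          exact ⟨List.mem_cons_self, hdinb, hc.2.2, hmono _ _ (vget_vset_self hs hdinb)⟩
      · intro p hp hinp hdotp
        rcases List.mem_cons.mp hp with rfl | hp'
        · exact hmono _ _ (vget_vset_self hs hinp)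
        · exact hproc p hp' hinp hdotp
      · have hfc := falseCount_vset hs hdinb hc.2.1
        have hlen1 : (d :: q).length = q.length + 1 := rfl
        have hlen2 : (news ++ [d]).length = news.length + 1 := by simp
        omega
    · have hstep : stepB g (v, q) d = (v, q) := by
        unfold stepB; rw [if_neg hc]
      rw [hstep]
      obtain ⟨news, hq, hsh, hmono, horig, hnews, hproc, hmeas⟩ := ih v q hs
      refine ⟨news, hq, hsh, hmono, horig, ?_, ?_, hmeas⟩
      · intro p hp
        obtain ⟨h1, h2, h3, h4⟩ := hnews p hp
        exact ⟨List.mem_cons_of_mem _ h1, h2, h3, h4⟩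
      · intro p hp hinp hdotp
        rcases List.mem_cons.mp hp with rfl | hp'
        · have hv : vget v p.1 p.2 = true := by
            rcases Bool.eq_false_or_eq_true (vget v p.1 p.2) with h | h
            · exact h
            · exact absurd ⟨hinp, h, hdotp⟩ hc
          exact hmono _ _ hv
        · exact hproc p hp' hinp hdotp

lemma floodB_correct (g : List (List String)) :
    ∀ (fuel : Nat) (q : List (Int × Int)) (v : List (List Bool)),
      Shape g v →
      (∀ p ∈ q, Inb g p ∧ vget v p.1 p.2 = true) →
      (∀ p : Int × Int, Inb g p → vget v p.1 p.2 = true →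
        Dot g p ∧ ∃ b, Seed g b ∧ Reach g b p) →
      (∀ p : Int × Int, Inb g p → vget v p.1 p.2 = true →
        p ∈ q ∨ ∀ r, Stp g p r → vget v r.1 r.2 = true) →
      (∀ b, Seed g b → vget v b.1 b.2 = true) →
      2 * falseCount v + q.length ≤ fuel →
      ∀ p : Int × Int, Inb g p →
        (vget (floodB g fuel q v) p.1 p.2 = true ↔ Dot g p ∧ ∃ b, Seed g b ∧ Reach g b p) := by
  intro fuel
  induction fuel with
  | zero =>
    intro q v hs hq hsound hcl hseeds hmeas p hp
    have hq0 : q = [] := List.length_eq_zero_iff.mp (by omega)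
    subst hq0
    rw [show floodB g 0 [] v = v from rfl]
    constructor
    · exact fun h => hsound p hp h
    · rintro ⟨hdot, b, hb, hr⟩
      exact (reach_visited
        (fun x hi hv => (hcl x hi hv).resolve_left List.not_mem_nil)
        hb.1 (hseeds b hb) hr).2
  | succ fuel ih =>
    intro q v hs hq hsound hcl hseeds hmeas p hp
    cases q with
    | nil =>
      rw [show floodB g (fuel + 1) [] v = v from rfl]
      constructor
      · exact fun h => hsound p hp h
      · rintro ⟨hdot, b, hb, hr⟩
        exact (reach_visited
          (fun x hi hv => (hcl x hi hv).resolve_left List.not_mem_nil)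
          hb.1 (hseeds b hb) hr).2
    | cons x rest =>
      have hunf : floodB g (fuel + 1) (x :: rest) v
          = floodB g fuel ((nbrs x).foldl (stepB g) (v, rest)).2
              ((nbrs x).foldl (stepB g) (v, rest)).1 := by
        simp only [floodB]
      rw [hunf]
      obtain ⟨news, hq2, hsh, hmono, horig, hnews, hproc, hmeas2⟩ :=
        foldB_spec g (nbrs x) v rest hs
      have hxq := hq x List.mem_cons_self
      obtain ⟨hxdot, bx, hbx, hrx⟩ := hsound x hxq.1 hxq.2
      refine ih _ _ hsh ?_ ?_ ?_ ?_ ?_ p hp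
      · intro y hy
        rw [hq2] at hy
        rcases List.mem_append.mp hy with hy | hy
        · obtain ⟨_, h2, _, h4⟩ := hnews y hy
          exact ⟨h2, h4⟩
        · exact ⟨(hq y (List.mem_cons_of_mem _ hy)).1,
            hmono _ _ (hq y (List.mem_cons_of_mem _ hy)).2⟩
      · intro y hyi hyv
        rcases horig y hyi hyv with h | h
        · obtain ⟨hd, b, hb, hr⟩ := hsound y hyi h
          exact ⟨hd, b, hb, hr⟩
        · obtain ⟨h1, h2, h3, _⟩ := hnews y h
          exact ⟨h3, bx, hbx, Relation.ReflTransGen.tail hrx ⟨h1, h2, h3⟩⟩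
      · intro y hyi hyv
        rcases horig y hyi hyv with h | h
        · rcases hcl y hyi h with hy | hcls
          · rcases List.mem_cons.mp hy with rfl | hy'
            · exact Or.inr (fun r hst => hproc r hst.1 hst.2.1 hst.2.2)
            · exact Or.inl (by rw [hq2]; exact List.mem_append_right _ hy')
          · exact Or.inr (fun r hst => hmono _ _ (hcls r hst))
        · exact Or.inl (by rw [hq2]; exact List.mem_append_left _ h)
      · exact fun b hb => hmono _ _ (hseeds b hb)
      · have hlen : (x :: rest).length = rest.length + 1 := rfl
        omega

-- B's computed reach matrix (the seed fold then the flood fill), characterised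
lemma reachB_correct (g : List (List String)) :
    ∀ p : Int × Int, Inb g p →
      (vget (floodB g (2 * g.length * (g.headD []).length + 1)
        ((prodL g).foldl (seedStep g)
          (List.replicate g.length (List.replicate (g.headD []).length false), [])).2
        ((prodL g).foldl (seedStep g)
          (List.replicate g.length (List.replicate (g.headD []).length false), [])).1) p.1 p.2 = true
        ↔ Dot g p ∧ ∃ b, Seed g b ∧ Reach g b p) := by
  obtain ⟨news, hq, hsh, hmono, horig, hnews, hproc, hmeas⟩ :=
    foldSeed_spec g (prodL g)
      (List.replicate g.length (List.replicate (g.headD []).length false)) []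
      (shape_replicate g) (nodup_prodL g)
      (fun p hp => ⟨mem_prodL.mp hp, vget_replicate _ _ _ _⟩)
  simp only [List.nil_append] at hq
  have hbase : ∀ p : Int × Int,
      vget (List.replicate g.length (List.replicate (g.headD []).length false)) p.1 p.2 ≠ true := by
    intro p
    rw [vget_replicate]
    simp
  refine floodB_correct g _ _ _ hsh ?_ ?_ ?_ ?_ ?_
  · intro p hp
    rw [hq] at hp
    obtain ⟨_, h2, h3⟩ := hnews p hp
    exact ⟨h2.1, h3⟩
  · intro p hpi hpv
    rcases horig p hpi hpv with h | h
    · exact absurd h (hbase p)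
    · obtain ⟨_, h2, _⟩ := hnews p h
      exact ⟨h2.2.2, p, h2, Relation.ReflTransGen.refl⟩
  · intro p hpi hpv
    rcases horig p hpi hpv with h | h
    · exact absurd h (hbase p)
    · exact Or.inl (by rw [hq]; exact h)
  · intro b hb
    exact hproc b (mem_prodL.mpr hb.1) hb
  · have h2 := falseCount_replicate g.length (g.headD []).length
    simp only [List.length_nil, Nat.add_zero] at hmeas
    rw [Nat.mul_assoc]
    omega

lemma interior_nbr_inb {g : List (List String)} {p n : Int × Int} (hp : Inb g p)
    (hb : ¬ (p.1 = 0 ∨ p.1 = (g.length : Int) - 1 ∨ p.2 = 0 ∨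
      p.2 = ((g.headD []).length : Int) - 1))
    (hn : n ∈ nbrs p) : Inb g n := by
  obtain ⟨p1, p2⟩ := p
  obtain ⟨n1, n2⟩ := n
  obtain ⟨h1, h2, h3, h4⟩ := hp
  simp only [nbrs, List.mem_cons, List.mem_singleton, Prod.mk.injEq, List.not_mem_nil,
    or_false] at hn
  simp only [not_or] at hb
  unfold Inb
  simp only at h1 h2 h3 h4 ⊢
  omega

-- ---- per-cell agreement and the assembly ----
lemma fork_eq_exposed (g : List (List String)) {p : Int × Int} (hp : Inb g p) :
    can_carry_by_fork g p.1 p.2 =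
      exposedB g (floodB g (2 * g.length * (g.headD []).length + 1)
        ((prodL g).foldl (seedStep g)
          (List.replicate g.length (List.replicate (g.headD []).length false), [])).2
        ((prodL g).foldl (seedStep g)
          (List.replicate g.length (List.replicate (g.headD []).length false), [])).1) p.1 p.2 := by
  have hR := reachB_correct g
  have hiff : can_carry_by_fork g p.1 p.2 = true ↔ exposedB g
      (floodB g (2 * g.length * (g.headD []).length + 1)
        ((prodL g).foldl (seedStep g)
          (List.replicate g.length (List.replicate (g.headD []).length false), [])).2
        ((prodL g).foldl (seedStep g)
          (List.replicate g.length (List.replicate (g.headD []).length false), [])).1)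
      p.1 p.2 = true := by
    rw [fork_correct hp, reach_bnd_iff hp]
    unfold exposedB
    by_cases hb : p.1 = 0 ∨ p.1 = (g.length : Int) - 1 ∨ p.2 = 0 ∨
        p.2 = ((g.headD []).length : Int) - 1
    · rw [if_pos hb]
      exact iff_of_true (Or.inl hb) rfl
    · rw [if_neg hb, List.any_eq_true]
      constructor
      · rintro (hb' | ⟨n, hstp, hmark⟩)
        · exact absurd hb' hb
        · exact ⟨n, hstp.1, (hR n hstp.2.1).mpr ⟨hstp.2.2, hmark⟩⟩
      · rintro ⟨n, hn, hv⟩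
        have hnInb : Inb g n := interior_nbr_inb hp hb hn
        have hch := (hR n hnInb).mp hv
        exact Or.inr ⟨n, ⟨hn, hnInb, hch.1⟩, hch.2⟩
  cases hA : can_carry_by_fork g p.1 p.2 <;> cases hB : exposedB g _ p.1 p.2 <;>
    simp_all

-- ===== VERDICT (by name: the statement is the Claim_ definition above) =====
theorem can_carry_spec : Claim_equal_can_carry := by
  intro g alp _ _
  unfold Spec_can_carry
  simp only [can_carry, can_carry_alt]
  by_cases hlen : 1 < PySem.Str.len alp
  · rw [if_pos hlen]
    have e1 : (PySem.List.pyRange 0 (g.length : Int) 1).foldl (fun acc r =>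
        (PySem.List.pyRange 0 ((g.headD []).length : Int) 1).foldl (fun acc c =>
          if gcell g r c = firstChar alp then
            if 1 < PySem.Str.len alp then acc ++ [(r, c)]
            else if can_carry_by_fork g r c then acc ++ [(r, c)] else acc
          else acc) acc) ([] : List (Int × Int))
        = (prodL g).foldl (fun acc q =>
          if gcell g q.1 q.2 = firstChar alp then
            if 1 < PySem.Str.len alp then acc ++ [q]
            else if can_carry_by_fork g q.1 q.2 then acc ++ [q] else acc
          else acc) ([] : List (Int × Int)) := nested_foldl_eq g (fun acc q =>
          if gcell g q.1 q.2 = firstChar alp then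
            if 1 < PySem.Str.len alp then acc ++ [q]
            else if can_carry_by_fork g q.1 q.2 then acc ++ [q] else acc
          else acc) []
    have e2 : (PySem.List.pyRange 0 (g.length : Int) 1).foldl (fun acc r =>
        (PySem.List.pyRange 0 ((g.headD []).length : Int) 1).foldl (fun acc c =>
          if gcell g r c = firstChar alp then acc ++ [(r, c)] else acc) acc)
          ([] : List (Int × Int))
        = (prodL g).foldl (fun acc q =>
          if gcell g q.1 q.2 = firstChar alp then acc ++ [q] else acc)
          ([] : List (Int × Int)) := nested_foldl_eq g (fun acc q =>
          if gcell g q.1 q.2 = firstChar alp then acc ++ [q] else acc) []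
    rw [e1, e2]
    have hfold : (prodL g).foldl (fun acc q =>
          if gcell g q.1 q.2 = firstChar alp then
            if 1 < PySem.Str.len alp then acc ++ [q]
            else if can_carry_by_fork g q.1 q.2 then acc ++ [q] else acc
          else acc) ([] : List (Int × Int))
        = (prodL g).foldl (fun acc q =>
          if gcell g q.1 q.2 = firstChar alp then acc ++ [q] else acc)
          ([] : List (Int × Int)) := by
      refine PySem.List.foldl_congr_mem _ _ _ _ ?_
      intro acc x _
      rw [if_pos hlen]
    rw [hfold]
  · rw [if_neg hlen]
    have eseed : (PySem.List.pyRange 0 (g.length : Int) 1).foldl (fun st r =>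
        (PySem.List.pyRange 0 ((g.headD []).length : Int) 1).foldl (fun st c =>
          seedStep g st (r, c)) st)
        (⟨List.replicate g.length (List.replicate (g.headD []).length false),
          ([] : List (Int × Int))⟩ : List (List Bool) × List (Int × Int))
        = (prodL g).foldl (seedStep g)
          (List.replicate g.length (List.replicate (g.headD []).length false), []) :=
      nested_foldl_eq g (seedStep g)
        (List.replicate g.length (List.replicate (g.headD []).length false), [])
    rw [eseed]
    have e1 : (PySem.List.pyRange 0 (g.length : Int) 1).foldl (fun acc r =>
        (PySem.List.pyRange 0 ((g.headD []).length : Int) 1).foldl (fun acc c =>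
          if gcell g r c = firstChar alp then
            if 1 < PySem.Str.len alp then acc ++ [(r, c)]
            else if can_carry_by_fork g r c then acc ++ [(r, c)] else acc
          else acc) acc) ([] : List (Int × Int))
        = (prodL g).foldl (fun acc q =>
          if gcell g q.1 q.2 = firstChar alp then
            if 1 < PySem.Str.len alp then acc ++ [q]
            else if can_carry_by_fork g q.1 q.2 then acc ++ [q] else acc
          else acc) ([] : List (Int × Int)) := nested_foldl_eq g (fun acc q =>
          if gcell g q.1 q.2 = firstChar alp then
            if 1 < PySem.Str.len alp then acc ++ [q]
            else if can_carry_by_fork g q.1 q.2 then acc ++ [q] else acc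
          else acc) []
    have e3 : (PySem.List.pyRange 0 (g.length : Int) 1).foldl (fun acc r =>
        (PySem.List.pyRange 0 ((g.headD []).length : Int) 1).foldl (fun acc c =>
          if gcell g r c = firstChar alp ∧ exposedB g
              (floodB g (2 * g.length * (g.headD []).length + 1)
                ((prodL g).foldl (seedStep g)
                  (List.replicate g.length
                    (List.replicate (g.headD []).length false), [])).2
                ((prodL g).foldl (seedStep g)
                  (List.replicate g.length
                    (List.replicate (g.headD []).length false), [])).1) r c
            then acc ++ [(r, c)] else acc) acc) ([] : List (Int × Int))
        = (prodL g).foldl (fun acc q =>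
          if gcell g q.1 q.2 = firstChar alp ∧ exposedB g
              (floodB g (2 * g.length * (g.headD []).length + 1)
                ((prodL g).foldl (seedStep g)
                  (List.replicate g.length
                    (List.replicate (g.headD []).length false), [])).2
                ((prodL g).foldl (seedStep g)
                  (List.replicate g.length
                    (List.replicate (g.headD []).length false), [])).1) q.1 q.2
            then acc ++ [q] else acc) ([] : List (Int × Int)) := nested_foldl_eq g
      (fun acc q =>
          if gcell g q.1 q.2 = firstChar alp ∧ exposedB g
              (floodB g (2 * g.length * (g.headD []).length + 1)
                ((prodL g).foldl (seedStep g)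
                  (List.replicate g.length
                    (List.replicate (g.headD []).length false), [])).2
                ((prodL g).foldl (seedStep g)
                  (List.replicate g.length
                    (List.replicate (g.headD []).length false), [])).1) q.1 q.2
            then acc ++ [q] else acc) []
    rw [e1, e3]
    have hfold : (prodL g).foldl (fun acc q =>
          if gcell g q.1 q.2 = firstChar alp then
            if 1 < PySem.Str.len alp then acc ++ [q]
            else if can_carry_by_fork g q.1 q.2 then acc ++ [q] else acc
          else acc) ([] : List (Int × Int))
        = (prodL g).foldl (fun acc q =>
          if gcell g q.1 q.2 = firstChar alp ∧ exposedB g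
              (floodB g (2 * g.length * (g.headD []).length + 1)
                ((prodL g).foldl (seedStep g)
                  (List.replicate g.length
                    (List.replicate (g.headD []).length false), [])).2
                ((prodL g).foldl (seedStep g)
                  (List.replicate g.length
                    (List.replicate (g.headD []).length false), [])).1) q.1 q.2
            then acc ++ [q] else acc) ([] : List (Int × Int)) := by
      refine PySem.List.foldl_congr_mem _ _ _ _ ?_
      intro acc x hx
      have hxi : Inb g x := mem_prodL.mp hx
      rw [if_neg hlen, fork_eq_exposed g hxi]
      by_cases hg : gcell g x.1 x.2 = firstChar alp
      · rw [if_pos hg]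
        by_cases he : exposedB g
            (floodB g (2 * g.length * (g.headD []).length + 1)
              ((prodL g).foldl (seedStep g)
                (List.replicate g.length
                  (List.replicate (g.headD []).length false), [])).2
              ((prodL g).foldl (seedStep g)
                (List.replicate g.length
                  (List.replicate (g.headD []).length false), [])).1) x.1 x.2 = true
        · rw [if_pos he, if_pos ⟨hg, he⟩]
        · rw [if_neg he, if_neg (fun hc => he hc.2)]
      · rw [if_neg hg, if_neg (fun hc => hg hc.1)]
    rw [hfold]
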